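-- pv_equiv track=rewrite | github.com/gitq10/shelter-vyshhorod | app.py | state_at
-- ===== SOURCE A (Python) =====
-- PATTERN = [("ALERT", 120), ("SAFE", 60), ("ALERT", 45), ("SAFE", 90)]
--
-- def pattern_length():
--     return sum(d for _, d in PATTERN)
--
-- def state_at(t):
--     """Return (state, elapsed_in_state, remaining_in_state) for t seconds into the loop."""
--     t_mod = t % pattern_length()
--     cum = 0
--     for state, dur in PATTERN:
--         if t_mod < cum + dur:
--             elapsed = t_mod - cum
--             remain = dur - elapsed
--             return state, int(elapsed), int(remain)
--         cum += dur
--     return "SAFE", 0, PATTERN[1][1]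
-- ===== SOURCE B (Python) =====
-- PATTERN = [("ALERT", 120), ("SAFE", 60), ("ALERT", 45), ("SAFE", 90)]
--
-- # prefix table of segment end times, built once: [120, 180, 225, 315]
-- _thresholds = []
-- _c = 0
-- for _, _d in PATTERN:
--     _c += _d
--     _thresholds.append(_c)
-- _total = _thresholds[-1]
--
-- def state_at(t):
--     """Return (state, elapsed_in_state, remaining_in_state) for t seconds into the loop."""
--     t_mod = t % _total
--     # hand-rolled bisect_right over the prefix table (A imports nothing, so no bisect module)
--     lo, hi = 0, len(_thresholds)
--     while lo < hi:
--         mid = (lo + hi) // 2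
--         if _thresholds[mid] <= t_mod:
--             lo = mid + 1
--         else:
--             hi = mid
--     state, dur = PATTERN[lo]
--     start = _thresholds[lo - 1] if lo > 0 else 0
--     elapsed = t_mod - start
--     return state, int(elapsed), int(dur - elapsed)
-- ===== Notes on version B (the rewrite author's own statement) =====
-- stated objective: alternative
-- what changed: Replaces A's linear accumulate-and-compare scan over PATTERN with a precomputed cumulative end-threshold table indexed by a binary search (hand-rolled bisect_right, since A imports nothing), then reads the segment's state/duration/start directly.
import Mathlib
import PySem

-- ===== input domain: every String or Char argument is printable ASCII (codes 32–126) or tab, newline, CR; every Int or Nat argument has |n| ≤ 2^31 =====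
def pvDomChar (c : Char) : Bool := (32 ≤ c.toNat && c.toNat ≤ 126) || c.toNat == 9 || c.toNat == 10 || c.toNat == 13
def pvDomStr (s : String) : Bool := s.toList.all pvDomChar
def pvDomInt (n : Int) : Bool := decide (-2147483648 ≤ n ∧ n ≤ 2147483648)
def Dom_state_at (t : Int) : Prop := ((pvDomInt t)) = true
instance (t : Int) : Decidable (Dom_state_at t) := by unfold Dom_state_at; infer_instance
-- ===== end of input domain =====

-- B replaces A's linear accumulate-and-compare scan with a prefix threshold table indexed by binary search; same values everywhere.

-- ===== PORT A =====
def patternA : List (String × Int) := [("ALERT", 120), ("SAFE", 60), ("ALERT", 45), ("SAFE", 90)]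

def pattern_length : Int := (patternA.map (fun p => p.2)).foldl (· + ·) 0

-- the for-loop of A: carries the running `cum`
def stateLoop (t_mod : Int) : Int → List (String × Int) → String × Int × Int
  | _, [] => ("SAFE", 0, (match PySem.List.pyGet? patternA 1 with | some p => p.2 | none => 0))
  | cum, (state, dur) :: rest =>
      if t_mod < cum + dur then (state, t_mod - cum, dur - (t_mod - cum))
      else stateLoop t_mod (cum + dur) rest

def state_at (t : Int) : String × Int × Int :=
  stateLoop (PySem.Int.mod t pattern_length) 0 patternA

-- ===== PORT B =====
-- prefix table of segment end times, built once (B's module-level loop)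
def thresholdsB : List Int := (patternA.foldl (fun (acc : List Int × Int) p =>
  (acc.1 ++ [acc.2 + p.2], acc.2 + p.2)) ([], 0)).1

def totalB : Int := (PySem.List.pyGet? thresholdsB (-1)).getD 0

-- the while-loop of B: hand-rolled bisect_right over the prefix table
def bsRight (xs : List Int) (x : Int) (lo hi : Int) : Int :=
  if _h : lo < hi then
    let mid := PySem.Int.floordiv (lo + hi) 2
    if (PySem.List.pyGet? xs mid).getD 0 ≤ x then bsRight xs x (mid + 1) hi
    else bsRight xs x lo mid
  else lo
termination_by (hi - lo).toNat
decreasing_by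
  · have h2 : PySem.Int.floordiv (lo + hi) 2 = (lo + hi) / 2 :=
      PySem.Int.floordiv_eq_ediv_of_pos (by norm_num)
    simp only [mid, h2] at *; omega
  · have h2 : PySem.Int.floordiv (lo + hi) 2 = (lo + hi) / 2 :=
      PySem.Int.floordiv_eq_ediv_of_pos (by norm_num)
    simp only [mid, h2] at *; omega

def state_at_alt (t : Int) : String × Int × Int :=
  let t_mod := PySem.Int.mod t totalB
  let lo := bsRight thresholdsB t_mod 0 (thresholdsB.length : Int)
  let sd := (PySem.List.pyGet? patternA lo).getD ("", 0)
  let start := if lo > 0 then (PySem.List.pyGet? thresholdsB (lo - 1)).getD 0 else 0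
  (sd.1, t_mod - start, sd.2 - (t_mod - start))

-- ===== PRECONDITION & SPEC =====
def Spec_state_at (t : Int) (out : String × Int × Int) : Prop := out = state_at_alt t
instance (t : Int) (out : String × Int × Int) : Decidable (Spec_state_at t out) := by unfold Spec_state_at; infer_instance

-- ===== CLAIM (what is proved, stated in full; the proofs are below) =====
def Claim_equal_state_at : Prop := ∀ (t : Int), Dom_state_at t → Spec_state_at t (state_at t)

-- ===== LEMMAS AND PROOFS =====

-- common piecewise description of the result, as a function of t mod 315
def pw (r : Int) : String × Int × Int :=
  if r < 120 then ("ALERT", r, 120 - r)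
  else if r < 180 then ("SAFE", r - 120, 180 - r)
  else if r < 225 then ("ALERT", r - 180, 225 - r)
  else ("SAFE", r - 225, 315 - r)

theorem A_eval (r : Int) (h1 : r < 315) : stateLoop r 0 patternA = pw r := by
  simp only [patternA, stateLoop, pw]
  norm_num
  split_ifs <;> simp only [Prod.mk.injEq, true_and] <;> omega

theorem bsRight_eval (r : Int) (h1 : r < 315) :
    bsRight thresholdsB r 0 4 =
      (if r < 120 then 0 else if r < 180 then 1 else if r < 225 then 2 else 3) := by
  rcases lt_or_ge r 120 with c1 | c1
  · have h120 : ((120 : Int) ≤ r) = False := by simp; omega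
    have h180 : ((180 : Int) ≤ r) = False := by simp; omega
    have h225 : ((225 : Int) ≤ r) = False := by simp; omega
    rw [if_pos c1]
    rw [bsRight]; norm_num [thresholdsB, patternA, PySem.Int.floordiv, Int.fdiv, Int.toNat, PySem.List.pyGet?, PySem.List.pyIdx?, h120, h180, h225]
    rw [bsRight]; norm_num [thresholdsB, patternA, PySem.Int.floordiv, Int.fdiv, Int.toNat, PySem.List.pyGet?, PySem.List.pyIdx?, h120, h180, h225]
    rw [bsRight]; norm_num [thresholdsB, patternA, PySem.Int.floordiv, Int.fdiv, Int.toNat, PySem.List.pyGet?, PySem.List.pyIdx?, h120, h180, h225]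
    rw [bsRight]; norm_num
  · rcases lt_or_ge r 180 with c2 | c2
    · have h120 : ((120 : Int) ≤ r) = True := by simp; omega
      have h180 : ((180 : Int) ≤ r) = False := by simp; omega
      have h225 : ((225 : Int) ≤ r) = False := by simp; omega
      rw [if_neg (by omega), if_pos c2]
      rw [bsRight]; norm_num [thresholdsB, patternA, PySem.Int.floordiv, Int.fdiv, Int.toNat, PySem.List.pyGet?, PySem.List.pyIdx?, h120, h180, h225]
      rw [bsRight]; norm_num [thresholdsB, patternA, PySem.Int.floordiv, Int.fdiv, Int.toNat, PySem.List.pyGet?, PySem.List.pyIdx?, h120, h180, h225]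
      rw [bsRight]; norm_num [thresholdsB, patternA, PySem.Int.floordiv, Int.fdiv, Int.toNat, PySem.List.pyGet?, PySem.List.pyIdx?, h120, h180, h225]
      rw [bsRight]; norm_num
    · rcases lt_or_ge r 225 with c3 | c3
      · have h180 : ((180 : Int) ≤ r) = True := by simp; omega
        have h225 : ((225 : Int) ≤ r) = False := by simp; omega
        rw [if_neg (by omega), if_neg (by omega), if_pos c3]
        rw [bsRight]; norm_num [thresholdsB, patternA, PySem.Int.floordiv, Int.fdiv, Int.toNat, PySem.List.pyGet?, PySem.List.pyIdx?, h180, h225]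
        rw [bsRight]; norm_num [thresholdsB, patternA, PySem.Int.floordiv, Int.fdiv, Int.toNat, PySem.List.pyGet?, PySem.List.pyIdx?, h180, h225]
        rw [bsRight]; norm_num
      · have h225 : ((225 : Int) ≤ r) = True := by simp; omega
        have h315 : ((315 : Int) ≤ r) = False := by simp; omega
        rw [if_neg (by omega), if_neg (by omega), if_neg (by omega)]
        rw [bsRight]; norm_num [thresholdsB, patternA, PySem.Int.floordiv, Int.fdiv, Int.toNat, PySem.List.pyGet?, PySem.List.pyIdx?, h225, h315]
        rw [bsRight]; norm_num [thresholdsB, patternA, PySem.Int.floordiv, Int.fdiv, Int.toNat, PySem.List.pyGet?, PySem.List.pyIdx?, h225, h315]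
        rw [bsRight]; norm_num

theorem B_eval (r : Int) (h1 : r < 315) :
    (let lo := bsRight thresholdsB r 0 (thresholdsB.length : Int)
     let sd := (PySem.List.pyGet? patternA lo).getD ("", 0)
     let start := if lo > 0 then (PySem.List.pyGet? thresholdsB (lo - 1)).getD 0 else 0
     (sd.1, r - start, sd.2 - (r - start))) = pw r := by
  have hlen : ((thresholdsB.length : Int)) = 4 := by decide
  rw [hlen, bsRight_eval r h1]
  simp only [pw]
  split_ifs <;>
    norm_num [patternA, thresholdsB, Int.toNat, Prod.mk.injEq, PySem.List.pyGet?, PySem.List.pyIdx?] <;>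
    omega

theorem state_at_eq_alt (t : Int) : state_at t = state_at_alt t := by
  have hpl : pattern_length = 315 := by decide
  have htot : totalB = 315 := by decide
  have hmod : PySem.Int.mod t 315 = t % 315 := PySem.Int.mod_eq_emod_of_pos (by norm_num)
  have h1 : t % 315 < 315 := Int.emod_lt_of_pos t (by norm_num)
  unfold state_at state_at_alt
  rw [hpl, htot, hmod]
  rw [A_eval _ h1]
  exact (B_eval _ h1).symm

-- ===== VERDICT (by name: the statement is the Claim_ definition above) =====
theorem state_at_spec : Claim_equal_state_at := by
  intro t _
  unfold Spec_state_at
  exact state_at_eq_alt t
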